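-- pv_equiv track=rewrite | github.com/AtmosSci-DLESM/DLESyM_Evals | zac/evaluation/plotting_utils.py | sort_variable_names_by_reference
-- ===== SOURCE A (Python) =====
-- OCEAN_FIELDS = [
--     "sit", "sst", "sic", "ssh", "s0m", "s10m", "s50m", "s100m", "s200m",
--     "t0m", "t5m", "t10m", "t25m", "t37.5m", "t50m", "t62.5m", "t75m", "t87.5m",
--     "t100m", "t125m", "t150m", "t200m", "t300m"
-- ]
--
-- ATMOS_FIELDS = [
--     "t2m", "t850", "tau300-700", "tcwv", "ws10", "z250", "z500", "z1000", "ttr"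
-- ]
--
-- def sort_variable_names_by_reference(variable_names, metric):
--     """
--     Sort a list of variable names (with metric prefix) by standard ocean/atmos order.
--     Use this when variables come from multiple datasets that may not all have the same set.
--
--     Args:
--         variable_names: List of full variable names (e.g. ["crps_ens.sst", "crps_ens.sit"]).
--         metric: Metric prefix (e.g., 'crps_ens').
--
--     Returns:
--         tuple: (sorted_list, is_ocean)
--             - sorted_list: Sorted list of variable names
--             - is_ocean: True if ordered by OCEAN_FIELDS, else ATMOS_FIELDS
--     """
--     if not variable_names:
--         return [], True
--
--     prefix_len = len(metric) + 1
--     suffixes = [v[prefix_len:] for v in variable_names if v.startswith(f"{metric}.")]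
--     if not suffixes:
--         return [], True
--
--     is_ocean = sum(s in OCEAN_FIELDS for s in suffixes) >= sum(s in ATMOS_FIELDS for s in suffixes)
--     ref_list = OCEAN_FIELDS if is_ocean else ATMOS_FIELDS
--
--     sorted_vars = sorted(
--         variable_names,
--         key=lambda v: ref_list.index(v[prefix_len:]) if v[prefix_len:] in ref_list else 999,
--     )
--     return sorted_vars, is_ocean
-- ===== SOURCE B (Python) =====
-- OCEAN_FIELDS = [
--     "sit", "sst", "sic", "ssh", "s0m", "s10m", "s50m", "s100m", "s200m",
--     "t0m", "t5m", "t10m", "t25m", "t37.5m", "t50m", "t62.5m", "t75m", "t87.5m",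
--     "t100m", "t125m", "t150m", "t200m", "t300m"
-- ]
--
-- ATMOS_FIELDS = [
--     "t2m", "t850", "tau300-700", "tcwv", "ws10", "z250", "z500", "z1000", "ttr"
-- ]
--
-- def sort_variable_names_by_reference(variable_names, metric):
--     """Bucket-by-reference re-implementation: no sort, no 999 sentinel key."""
--     if not variable_names:
--         return [], True
--
--     prefix_len = len(metric) + 1
--     suffixes = [v[prefix_len:] for v in variable_names if v.startswith(metric + ".")]
--     if not suffixes:
--         return [], True
--
--     ocean_hits = sum(1 for s in suffixes if s in OCEAN_FIELDS)
--     atmos_hits = sum(1 for s in suffixes if s in ATMOS_FIELDS)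
--     is_ocean = ocean_hits >= atmos_hits
--     ref_list = OCEAN_FIELDS if is_ocean else ATMOS_FIELDS
--
--     ordered = [v for f in ref_list for v in variable_names if v[prefix_len:] == f]
--     rest = [v for v in variable_names if v[prefix_len:] not in ref_list]
--     return ordered + rest, is_ocean
-- ===== Notes on version B (the rewrite author's own statement) =====
-- stated objective: simpler
-- what changed: Replaces the stable sort with index-or-999 sentinel key by direct bucketing: walk the reference field list appending matching names in input order, then append the remaining names in input order.
import Mathlib
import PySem

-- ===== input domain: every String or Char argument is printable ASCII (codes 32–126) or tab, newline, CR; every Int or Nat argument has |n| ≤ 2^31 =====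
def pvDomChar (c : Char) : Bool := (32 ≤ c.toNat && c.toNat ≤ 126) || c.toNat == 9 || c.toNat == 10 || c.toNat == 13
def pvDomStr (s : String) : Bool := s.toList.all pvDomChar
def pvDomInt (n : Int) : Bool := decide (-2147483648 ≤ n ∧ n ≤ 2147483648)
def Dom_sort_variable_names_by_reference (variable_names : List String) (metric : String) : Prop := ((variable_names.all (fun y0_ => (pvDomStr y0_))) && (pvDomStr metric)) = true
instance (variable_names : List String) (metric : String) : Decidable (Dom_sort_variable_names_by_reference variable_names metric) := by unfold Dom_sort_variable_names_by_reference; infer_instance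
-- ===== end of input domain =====

-- B replaces A's stable sort with a sentinel key (index-or-999) by direct bucketing along the
-- reference list; same return value, chosen for simplicity (no speed claim).
-- Strings are handled on the List Char side throughout (PySem.Chars / toList), which is exact.

-- module constants (shared context of both implementations)
def OCEAN_FIELDS : List String :=
  ["sit", "sst", "sic", "ssh", "s0m", "s10m", "s50m", "s100m", "s200m",
   "t0m", "t5m", "t10m", "t25m", "t37.5m", "t50m", "t62.5m", "t75m", "t87.5m",
   "t100m", "t125m", "t150m", "t200m", "t300m"]

def ATMOS_FIELDS : List String :=
  ["t2m", "t850", "tau300-700", "tcwv", "ws10", "z250", "z500", "z1000", "ttr"]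

-- ===== PORT A =====
-- literal port of A: v[prefix_len:] is PySem.List.slice (exact), v.startswith(metric+".") is
-- PySem.Chars.startswith on the code points, sorted(…, key=…) is PySem.List.sorted (stable, exact);
-- `ref_list.index(s) if s in ref_list else 999` is the guarded PySem.List.index? (getD unreachable under the guard).
def sort_variable_names_by_reference (variable_names : List String) (metric : String) : List String × Bool :=
  if variable_names = [] then ([], true)
  else
    let prefix_len : Nat := metric.toList.length + 1
    let suffixes : List (List Char) :=
      (variable_names.filter (fun v => PySem.Chars.startswith v.toList (metric.toList ++ ['.']))).map
        (fun v => PySem.List.slice v.toList (some (prefix_len : Int)) none)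
    if suffixes = [] then ([], true)
    else
      let is_ocean : Bool :=
        decide ((suffixes.map (fun s => if (OCEAN_FIELDS.map String.toList).contains s then (1 : Int) else 0)).sum
          ≥ (suffixes.map (fun s => if (ATMOS_FIELDS.map String.toList).contains s then (1 : Int) else 0)).sum)
      let ref_list : List (List Char) :=
        if is_ocean then OCEAN_FIELDS.map String.toList else ATMOS_FIELDS.map String.toList
      let key : String → Int := fun v =>
        let s := PySem.List.slice v.toList (some (prefix_len : Int)) none
        if ref_list.contains s then (((PySem.List.index? ref_list s).getD 0 : Nat) : Int) else 999
      (PySem.List.sorted variable_names key false, is_ocean)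

-- ===== PORT B =====
-- literal port of B (Source B): bucket the names along the reference list, then the leftovers.
def sort_variable_names_by_reference_alt (variable_names : List String) (metric : String) : List String × Bool :=
  if variable_names = [] then ([], true)
  else
    let prefix_len : Nat := metric.toList.length + 1
    let suffixes : List (List Char) :=
      (variable_names.filter (fun v => PySem.Chars.startswith v.toList (metric.toList ++ ['.']))).map
        (fun v => v.toList.drop prefix_len)
    if suffixes = [] then ([], true)
    else
      let ocean_hits : Nat := suffixes.countP (fun s => (OCEAN_FIELDS.map String.toList).contains s)
      let atmos_hits : Nat := suffixes.countP (fun s => (ATMOS_FIELDS.map String.toList).contains s)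
      let is_ocean : Bool := decide (ocean_hits ≥ atmos_hits)
      let ref_list : List (List Char) :=
        if is_ocean then OCEAN_FIELDS.map String.toList else ATMOS_FIELDS.map String.toList
      let ordered : List String :=
        ref_list.flatMap (fun f => variable_names.filter (fun v => v.toList.drop prefix_len == f))
      let rest : List String :=
        variable_names.filter (fun v => !(ref_list.contains (v.toList.drop prefix_len)))
      (ordered ++ rest, is_ocean)

-- ===== PRECONDITION & SPEC =====
def Spec_sort_variable_names_by_reference (variable_names : List String) (metric : String) (out : List String × Bool) : Prop := out = sort_variable_names_by_reference_alt variable_names metric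
instance (variable_names : List String) (metric : String) (out : List String × Bool) : Decidable (Spec_sort_variable_names_by_reference variable_names metric out) := by unfold Spec_sort_variable_names_by_reference; infer_instance

-- ===== CLAIM (what is proved, stated in full; the proofs are below) =====
def Claim_equal_sort_variable_names_by_reference : Prop := ∀ (variable_names : List String) (metric : String), Dom_sort_variable_names_by_reference variable_names metric → Spec_sort_variable_names_by_reference variable_names metric (sort_variable_names_by_reference variable_names metric)

-- ===== LEMMAS AND PROOFS =====

theorem insertBy_append_of_forall_not_before {α : Type} (before : α → α → Bool) (x : α)
    (as bs : List α) (h : ∀ a ∈ as, before x a = false) :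
    PySem.List.insertBy before x (as ++ bs) = as ++ PySem.List.insertBy before x bs := by
  induction as with
  | nil => rfl
  | cons a as ih =>
    have ha : before x a = false := h a (by simp)
    have := ih (fun a ha' => h a (by simp [ha']))
    simp only [List.cons_append, PySem.List.insertBy, ha, Bool.false_eq_true, if_false, this]

theorem insertBy_blocks {α : Type} (key : α → Int) (ks : List Int) (hks : ks.Pairwise (· < ·))
    (x : α) (hx : key x ∈ ks) (xs : List α) :
    PySem.List.insertBy (fun a b => decide (key a < key b)) x
        (ks.flatMap (fun k => xs.filter (fun y => key y == k)))
      = ks.flatMap (fun k => (xs ++ [x]).filter (fun y => key y == k)) := by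
  induction ks with
  | nil => simp at hx
  | cons k ks ih =>
    have hklt : ∀ k' ∈ ks, k < k' := by
      intro k' hk'; exact (List.pairwise_cons.mp hks).1 k' hk'
    have hks' := (List.pairwise_cons.mp hks).2
    have hblockA : ∀ a ∈ xs.filter (fun y => key y == k), (decide (key x < key a)) = false := by
      intro a ha
      have := List.of_mem_filter ha
      have hka : key a = k := by simpa using this
      rcases List.mem_cons.mp hx with h | h
      · simp [hka, h]
      · have := hklt _ h
        simp [hka]; omega
    by_cases hxk : key x = k
    · -- x belongs to the first block
      have hnot : key x ∉ ks := by
        intro hmem; have := hklt _ hmem; omega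
      have hrest : ∀ k' ∈ ks, (xs ++ [x]).filter (fun y => key y == k') = xs.filter (fun y => key y == k') := by
        intro k' hk'
        have : (key x == k') = false := by
          have := hklt _ hk'; simp; omega
        simp [List.filter_append, this]
      have htail : PySem.List.insertBy (fun a b => decide (key a < key b)) x
          (ks.flatMap (fun k' => xs.filter (fun y => key y == k')))
          = x :: ks.flatMap (fun k' => xs.filter (fun y => key y == k')) := by
        cases hbl : ks.flatMap (fun k' => xs.filter (fun y => key y == k')) with
        | nil => rfl
        | cons b t =>
          have hb : b ∈ ks.flatMap (fun k' => xs.filter (fun y => key y == k')) := by simp [hbl]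
          rcases List.mem_flatMap.mp hb with ⟨k', hk', hbf⟩
          have hkb : key b = k' := by simpa using List.of_mem_filter hbf
          have : decide (key x < key b) = true := by
            have := hklt _ hk'; simp [hkb, hxk]; omega
          simp only [PySem.List.insertBy, this, if_true]
      rw [List.flatMap_cons, insertBy_append_of_forall_not_before _ _ _ _ hblockA, htail,
        List.flatMap_cons]
      have h1 : (xs ++ [x]).filter (fun y => key y == k) = xs.filter (fun y => key y == k) ++ [x] := by
        simp [List.filter_append, hxk]
      rw [h1, List.flatMap_congr hrest]
      simp
    · have hxks : key x ∈ ks := by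
        rcases List.mem_cons.mp hx with h | h
        · exact absurd h hxk
        · exact h
      have h1 : (xs ++ [x]).filter (fun y => key y == k) = xs.filter (fun y => key y == k) := by
        have : (key x == k) = false := by simp [hxk]
        simp [List.filter_append, this]
      rw [List.flatMap_cons, insertBy_append_of_forall_not_before _ _ _ _ hblockA,
        ih hks' hxks, List.flatMap_cons, h1]

theorem sorted_eq_blocks {α : Type} (key : α → Int) (ks : List Int) (hks : ks.Pairwise (· < ·))
    (xs : List α) (hxs : ∀ y ∈ xs, key y ∈ ks) :
    PySem.List.sorted xs key false = ks.flatMap (fun k => xs.filter (fun y => key y == k)) := by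
  induction xs using List.reverseRecOn with
  | nil => simp [PySem.List.sorted]
  | append_singleton xs x ih =>
    rw [PySem.List.sorted_eq_foldl_insertBy, List.foldl_append]
    simp only [List.foldl_cons, List.foldl_nil]
    rw [← PySem.List.sorted_eq_foldl_insertBy, ih (fun y hy => hxs y (by simp [hy]))]
    exact insertBy_blocks key ks hks x (hxs x (by simp)) xs

theorem flatMap_range_getD {α β : Type} (l : List α) (d : α) (g : α → List β) :
    (List.range l.length).flatMap (fun i => g (l.getD i d)) = l.flatMap g := by
  induction l using List.reverseRecOn with
  | nil => simp
  | append_singleton l a ih =>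
    have hlen : (l ++ [a]).length = l.length + 1 := by simp
    rw [hlen, List.range_succ, List.flatMap_append, List.flatMap_append]
    have h1 : (List.range l.length).flatMap (fun i => g ((l ++ [a]).getD i d))
        = (List.range l.length).flatMap (fun i => g (l.getD i d)) := by
      refine List.flatMap_congr (fun i hi => ?_)
      have : i < l.length := List.mem_range.mp hi
      rw [List.getD_append _ _ _ _ this]
    have h2 : (l ++ [a]).getD l.length d = a := by
      simp [List.getD_eq_getElem?_getD]
    simp only [h1, ih, List.flatMap_cons, List.flatMap_nil, h2, List.append_nil]

theorem index?_some_iff_getD {α : Type} [BEq α] [LawfulBEq α] (l : List α) (hnd : l.Nodup)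
    (s : α) (hs : s ∈ l) (i : Nat) (hi : i < l.length) (d : α) :
    PySem.List.index? l s = some i ↔ l.getD i d = s := by
  constructor
  · intro h
    obtain ⟨hk, hget, _⟩ := PySem.List.getElem_of_index?_eq_some h
    rw [List.getD_eq_getElem l d hi]
    exact hget
  · intro h
    obtain ⟨j, hj⟩ := (PySem.List.index?_isSome_iff l s).mpr hs |> Option.isSome_iff_exists.mp
    obtain ⟨hjlt, hgetj, _⟩ := PySem.List.getElem_of_index?_eq_some hj
    have : l[j] = l[i] := by rw [hgetj, ← h, List.getD_eq_getElem l d hi]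
    have hji : j = i := (List.Nodup.getElem_inj_iff hnd).mp this
    rwa [hji] at hj

theorem sorted_key_eq_buckets (vn : List String) (sfx : String → List Char)
    (ref : List (List Char)) (hnd : ref.Nodup) (hlen : ref.length < 999) :
    PySem.List.sorted vn
        (fun v => if ref.contains (sfx v)
          then (((PySem.List.index? ref (sfx v)).getD 0 : Nat) : Int) else 999) false
      = ref.flatMap (fun f => vn.filter (fun v => sfx v == f))
        ++ vn.filter (fun v => !(ref.contains (sfx v))) := by
  set key : String → Int := fun v => if ref.contains (sfx v)
      then (((PySem.List.index? ref (sfx v)).getD 0 : Nat) : Int) else 999 with hkey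
  have hsome : ∀ v, ref.contains (sfx v) = true →
      ∃ i, PySem.List.index? ref (sfx v) = some i ∧ i < ref.length ∧ key v = (i : Int) := by
    intro v hc
    have hmem : sfx v ∈ ref := by simpa using hc
    obtain ⟨i, hi⟩ := (PySem.List.index?_isSome_iff ref (sfx v)).mpr hmem |> Option.isSome_iff_exists.mp
    obtain ⟨hlt, _, _⟩ := PySem.List.getElem_of_index?_eq_some hi
    refine ⟨i, hi, hlt, ?_⟩
    simp only [hkey]
    rw [if_pos hc, hi]
    rfl
  set ks : List Int := (List.range ref.length).map (fun i => ((i : Nat) : Int)) ++ [999] with hksdef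
  have hks : ks.Pairwise (· < ·) := by
    rw [hksdef]
    refine List.pairwise_append.mpr ⟨?_, by simp, ?_⟩
    · rw [List.pairwise_map]
      exact (List.pairwise_lt_range).imp (fun h => by exact_mod_cast h)
    · intro a ha b hb
      simp only [List.mem_map, List.mem_range] at ha
      simp only [List.mem_singleton] at hb
      obtain ⟨i, hi, rfl⟩ := ha
      subst hb
      have : i < 999 := lt_trans hi hlen
      exact_mod_cast this
  have hcov : ∀ y ∈ vn, key y ∈ ks := by
    intro y _
    by_cases hc : ref.contains (sfx y) = true
    · obtain ⟨i, _, hilt, hkv⟩ := hsome y hc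
      rw [hksdef]
      exact List.mem_append_left _ (List.mem_map.mpr ⟨i, List.mem_range.mpr hilt, hkv.symm⟩)
    · rw [hksdef]
      refine List.mem_append_right _ ?_
      have : key y = 999 := by simp only [hkey]; rw [if_neg hc]
      simp [this]
  rw [sorted_eq_blocks key ks hks vn hcov, hksdef, List.flatMap_append]
  congr 1
  · rw [List.flatMap_map]
    rw [← flatMap_range_getD ref [] (fun f => vn.filter (fun v => sfx v == f))]
    refine List.flatMap_congr ?_
    intro i hi
    have hilt : i < ref.length := List.mem_range.mp hi
    refine List.filter_congr ?_
    intro v _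
    by_cases hc : ref.contains (sfx v) = true
    · obtain ⟨j, hj, hjlt, hkv⟩ := hsome v hc
      have hiff : PySem.List.index? ref (sfx v) = some i ↔ ref.getD i [] = sfx v :=
        index?_some_iff_getD ref hnd (sfx v) (by simpa using hc) i hilt []
      by_cases hji : j = i
      · have hgd : ref.getD i [] = sfx v := hiff.mp (hji ▸ hj)
        have h1 : (key v == ((i : Nat) : Int)) = true := by rw [hkv, hji]; exact beq_self_eq_true _
        have h2 : (sfx v == ref.getD i []) = true := beq_iff_eq.mpr hgd.symm
        rw [h1, h2]
      · have h1 : (key v == ((i : Nat) : Int)) = false := by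
          refine beq_eq_false_iff_ne.mpr ?_
          rw [hkv]
          exact_mod_cast hji
        have h2 : (sfx v == ref.getD i []) = false := by
          refine beq_eq_false_iff_ne.mpr ?_
          intro heq
          exact hji (by injection hj ▸ hiff.mpr heq.symm)
        rw [h1, h2]
    · have hkv : key v = 999 := by simp only [hkey]; rw [if_neg hc]
      have h1 : (key v == ((i : Nat) : Int)) = false := by
        refine beq_eq_false_iff_ne.mpr ?_
        rw [hkv]
        have : i < 999 := lt_trans hilt hlen
        omega
      have h2 : (sfx v == ref.getD i []) = false := by
        refine beq_eq_false_iff_ne.mpr ?_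
        intro heq
        have : sfx v ∈ ref := by
          rw [heq, List.getD_eq_getElem ref [] hilt]
          exact List.getElem_mem hilt
        simp [this] at hc
      rw [h1, h2]
  · simp only [List.flatMap_cons, List.flatMap_nil, List.append_nil]
    refine List.filter_congr ?_
    intro v _
    by_cases hc : ref.contains (sfx v) = true
    · obtain ⟨j, hj, hjlt, hkv⟩ := hsome v hc
      have h1 : (key v == (999 : Int)) = false := by
        refine beq_eq_false_iff_ne.mpr ?_
        rw [hkv]
        omega
      rw [h1, hc]
      rfl
    · have hkv : key v = 999 := by simp only [hkey]; rw [if_neg hc]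
      have h1 : (key v == (999 : Int)) = true := by rw [hkv]; exact beq_self_eq_true _
      rw [h1, Bool.eq_false_iff.mpr hc]
      rfl


-- ===== VERDICT (by name: the statement is the Claim_ definition above) =====
theorem sort_variable_names_by_reference_spec : Claim_equal_sort_variable_names_by_reference := by
  intro vn metric _
  unfold Spec_sort_variable_names_by_reference
  unfold sort_variable_names_by_reference sort_variable_names_by_reference_alt
  by_cases h1 : vn = []
  · simp [h1]
  · simp only [if_neg h1, PySem.List.slice_from_natCast, PySem.List.sum_map_ite_one_zero,
      ge_iff_le, Nat.cast_le]
    split_ifs with h2 h3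
    · rfl
    · refine congrArg₂ Prod.mk ?_ rfl
      exact sorted_key_eq_buckets vn (fun v => v.toList.drop (metric.toList.length + 1))
        (OCEAN_FIELDS.map String.toList) (by decide) (by decide)
    · refine congrArg₂ Prod.mk ?_ rfl
      exact sorted_key_eq_buckets vn (fun v => v.toList.drop (metric.toList.length + 1))
        (ATMOS_FIELDS.map String.toList) (by decide) (by decide)
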